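-- pv_equiv track=rewrite | github.com/sgpirate/ICT1008 | blocks_problem with UI.py | checkForRep
-- ===== SOURCE A (Python) =====
-- def checkForRep(toCheck):
--     removeSpaces = toCheck.replace(" ","")
--     seen = set()
--     for x in removeSpaces:
--         if x not in seen:
--             seen.add(x)
--         else:   # Repeated character found
--             return True
-- ===== SOURCE B (Python) =====
-- def checkForRep(toCheck):
--     t = sorted(toCheck.replace(" ", ""))
--     for a, b in zip(t, t[1:]):
--         if a == b:
--             return True
-- ===== Notes on version B (the rewrite author's own statement) =====
-- stated objective: alternative
-- what changed: The incremental seen-set early-exit scan is replaced by sort-then-adjacent-scan: sort the space-stripped characters and report a duplicate iff two equal characters sit next to each other (correct because sorting puts equal characters adjacent).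
import Mathlib
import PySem

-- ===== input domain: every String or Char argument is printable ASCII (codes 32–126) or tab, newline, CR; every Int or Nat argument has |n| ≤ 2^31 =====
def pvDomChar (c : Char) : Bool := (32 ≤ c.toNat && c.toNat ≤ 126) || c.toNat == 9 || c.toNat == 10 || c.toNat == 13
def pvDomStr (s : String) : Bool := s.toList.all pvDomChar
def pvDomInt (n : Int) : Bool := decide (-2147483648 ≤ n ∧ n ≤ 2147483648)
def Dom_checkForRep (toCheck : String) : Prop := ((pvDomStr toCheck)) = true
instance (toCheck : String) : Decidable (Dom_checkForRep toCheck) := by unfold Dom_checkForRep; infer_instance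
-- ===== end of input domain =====

-- B replaces the incremental seen-set early-exit scan by sort-then-adjacent-scan (same result, O(n log n)).

-- ===== PORT A =====
-- for x in removeSpaces: if x not in seen: seen.add(x) else: return True
def pvGoA : List Char → PySem.Set Char → Option Bool
  | [], _ => none
  | x :: xs, seen =>
    if ¬ PySem.Set.contains seen x then pvGoA xs (PySem.Set.add seen x)
    else some true

def checkForRep (toCheck : String) : Option Bool :=
  let removeSpaces := PySem.Str.replace toCheck " " ""
  pvGoA removeSpaces.toList PySem.Set.empty

-- ===== PORT B =====
-- for a, b in zip(t, t[1:]): if a == b: return True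
def pvAdjB : List (Char × Char) → Option Bool
  | [] => none
  | (a, b) :: rest => if a == b then some true else pvAdjB rest

def checkForRep_alt (toCheck : String) : Option Bool :=
  let t := PySem.List.sorted (PySem.Str.replace toCheck " " "").toList (fun x => x) false
  pvAdjB (t.zip (PySem.List.slice t (some 1)))

-- ===== PRECONDITION & SPEC =====
def Spec_checkForRep (toCheck : String) (out : Option Bool) : Prop := out = checkForRep_alt toCheck
instance (toCheck : String) (out : Option Bool) : Decidable (Spec_checkForRep toCheck out) := by unfold Spec_checkForRep; infer_instance

-- ===== CLAIM (what is proved, stated in full; the proofs are below) =====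
def Claim_equal_checkForRep : Prop := ∀ (toCheck : String), Dom_checkForRep toCheck → Spec_checkForRep toCheck (checkForRep toCheck)

-- ===== LEMMAS AND PROOFS =====

-- A's scan returns none exactly on inputs with no repetition (and no seed collision).
theorem pvGoA_eq (l : List Char) (s : PySem.Set Char) :
    pvGoA l s = if l.Nodup ∧ ∀ x ∈ l, x ∉ s then none else some true := by
  induction l generalizing s with
  | nil => simp [pvGoA]
  | cons x xs ih =>
    simp only [pvGoA]
    have hmem : PySem.Set.contains s x = true ↔ x ∈ s := PySem.Set.contains_iff s x
    by_cases hx : x ∈ s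
    · rw [if_neg (by simpa using hx),
        if_neg (by rintro ⟨-, hall⟩; exact hall x List.mem_cons_self hx)]
    · rw [if_pos (by simpa using hx), ih]
      congr 1
      simp only [eq_iff_iff]
      constructor
      · rintro ⟨hnd, hall⟩
        refine ⟨List.nodup_cons.mpr ⟨fun hxxs => ?_, hnd⟩, fun y hy hys => ?_⟩
        · exact (hall x hxxs) ((PySem.Set.mem_add s x x).mpr (Or.inr rfl))
        · rcases List.mem_cons.mp hy with rfl | hy'
          · exact hx hys
          · exact hall y hy' ((PySem.Set.mem_add s x y).mpr (Or.inl hys))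
      · rintro ⟨hnd, hall⟩
        rcases List.nodup_cons.mp hnd with ⟨hxmem, hnd'⟩
        refine ⟨hnd', fun y hy => ?_⟩
        rw [PySem.Set.mem_add]
        rintro (h | rfl)
        · exact hall y (List.mem_cons_of_mem _ hy) h
        · exact hxmem hy

-- B's adjacent scan on a ≤-sorted list returns none exactly on duplicate-free lists.
theorem pvAdjB_eq (t : List Char) (hs : t.Pairwise (· ≤ ·)) :
    pvAdjB (t.zip (t.drop 1)) = if t.Nodup then none else some true := by
  induction t with
  | nil => simp [pvAdjB]
  | cons x xs ih =>
    cases xs with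
    | nil => simp [pvAdjB]
    | cons y r =>
      have hs' : (y :: r).Pairwise (· ≤ ·) := hs.sublist (List.sublist_cons_self _ _)
      have hxle : ∀ z ∈ y :: r, x ≤ z := fun z hz => (List.pairwise_cons.mp hs).1 z hz
      simp only [List.drop_one, List.tail_cons, List.zip_cons_cons, pvAdjB]
      by_cases hxy : x = y
      · rw [if_pos (by simp [hxy]), if_neg]
        simp [hxy]
      · rw [if_neg (by simp [hxy])]
        have hrec := ih hs'
        simp only [List.drop_one, List.tail_cons] at hrec
        rw [hrec]
        have hxnot : x ∉ y :: r := by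
          intro hxin
          rcases List.mem_cons.mp hxin with h | h
          · exact hxy h
          · exact hxy (le_antisymm (hxle y List.mem_cons_self)
              ((List.pairwise_cons.mp hs').1 x h))
        congr 1
        simp [List.nodup_cons, hxnot]

-- ===== VERDICT (by name: the statement is the Claim_ definition above) =====
theorem checkForRep_spec : Claim_equal_checkForRep := by
  intro toCheck _
  show checkForRep toCheck = checkForRep_alt toCheck
  unfold checkForRep checkForRep_alt
  dsimp only
  rw [PySem.List.slice_from _ (by norm_num), pvGoA_eq]
  norm_num only [Int.toNat_one]
  rw [pvAdjB_eq _ (by simpa using (PySem.List.sorted_pairwise (PySem.Str.replace toCheck " " "").toList (fun x => x)))]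
  have hnd := (PySem.List.sorted_perm (PySem.Chars.replace toCheck.toList [' '] [])
      (fun x => x) false).nodup_iff
  simp [PySem.Set.empty, hnd]
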